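-- pv_equiv track=rewrite | github.com/dengruihan/OpenStoryLine_Ray | src/open_storyline/nodes/core_nodes/speech_rough_cut.py | group_sentences
-- ===== SOURCE A (Python) =====
-- def group_sentences(items, gap_threshold: int = 400):
--     """Group sentences into segments by gap threshold (ms)."""
--     segments = []
--     if not items:
--         return segments
--     current = [items[0]]
--     for i in range(len(items) - 1):
--         cur = items[i]
--         nxt = items[i + 1]
--         gap = nxt["start"] - cur["end"]
--         if gap > gap_threshold:
--             segments.append(current)
--             current = [nxt]
--         else:
--             current.append(nxt)
--     if current:
--         segments.append(current)
--     return segments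
-- ===== SOURCE B (Python) =====
-- def group_sentences(items, gap_threshold: int = 400):
--     """Group sentences into segments by gap threshold (ms)."""
--     if not items:
--         return []
--     n = len(items)
--     cuts = [i for i in range(1, n)
--             if items[i]["start"] - items[i - 1]["end"] > gap_threshold]
--     bounds = [0] + cuts + [n]
--     return [items[a:b] for a, b in zip(bounds, bounds[1:])]
-- ===== Notes on version B (the rewrite author's own statement) =====
-- stated objective: alternative
-- what changed: Replaces A's single pass with a segments/current accumulator by a two-phase decomposition: first collect the boundary indices where the time gap exceeds the threshold, then cut the list into slices between consecutive bounds via zip.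
import Mathlib
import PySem

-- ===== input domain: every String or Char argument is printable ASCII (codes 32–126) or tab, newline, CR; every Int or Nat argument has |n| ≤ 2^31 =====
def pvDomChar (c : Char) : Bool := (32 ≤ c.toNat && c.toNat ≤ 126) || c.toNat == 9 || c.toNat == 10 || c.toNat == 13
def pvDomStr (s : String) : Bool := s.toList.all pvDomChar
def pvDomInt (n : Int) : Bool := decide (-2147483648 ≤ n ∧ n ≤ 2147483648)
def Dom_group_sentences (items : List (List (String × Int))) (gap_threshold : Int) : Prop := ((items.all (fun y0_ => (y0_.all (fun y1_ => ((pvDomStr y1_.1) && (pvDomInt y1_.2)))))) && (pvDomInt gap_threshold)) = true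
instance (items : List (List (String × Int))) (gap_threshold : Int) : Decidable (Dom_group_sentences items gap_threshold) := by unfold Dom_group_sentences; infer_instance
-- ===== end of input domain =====

-- B replaces A's one-pass segments/current accumulator by two phases: collect gap-boundary
-- indices, then slice the list between consecutive bounds (alternative decomposition, same cost).


-- gap between two sentence dicts: nxt["start"] - cur["end"] (first-match assoc lookup; Pre_ guarantees presence)
def pvGap (nxt cur : List (String × Int)) : Int :=
  ((List.lookup "start" nxt).getD 0) - ((List.lookup "end" cur).getD 0)

-- ===== PORT A =====
def pvStepA (items : List (List (String × Int))) (gap_threshold : Int)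
    (st : List (List (List (String × Int))) × List (List (String × Int))) (i : Int) :
    List (List (List (String × Int))) × List (List (String × Int)) :=
  let cur := PySem.List.pyGetD items i []
  let nxt := PySem.List.pyGetD items (i + 1) []
  if pvGap nxt cur > gap_threshold then (st.1 ++ [st.2], [nxt]) else (st.1, st.2 ++ [nxt])

def group_sentences (items : List (List (String × Int))) (gap_threshold : Int) : List (List (List (String × Int))) :=
  match items with
  | [] => []
  | x :: _ =>
    let st := (PySem.List.pyRange 0 ((items.length : Int) - 1) 1).foldl (pvStepA items gap_threshold) ([], [x])
    if st.2.isEmpty then st.1 else st.1 ++ [st.2]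

-- ===== PORT B =====
def group_sentences_alt (items : List (List (String × Int))) (gap_threshold : Int) : List (List (List (String × Int))) :=
  if items.isEmpty then [] else
    let n : Int := items.length
    let cuts := (PySem.List.pyRange 1 n 1).filter
      (fun i => decide (pvGap (PySem.List.pyGetD items i []) (PySem.List.pyGetD items (i - 1) []) > gap_threshold))
    let bounds := 0 :: (cuts ++ [n])
    (bounds.zip bounds.tail).map (fun p => PySem.List.slice items (some p.1) (some p.2))

-- ===== PRECONDITION & SPEC =====
-- Pre_ excludes (a) inputs where A raises KeyError: some consecutive pair lacks the "end" key on
-- the left or the "start" key on the right; and (b) association lists with duplicate keys, which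
-- do not encode any Python dict (a dict cannot hold a key twice), so first-match lookup is exact.
def Pre_group_sentences (items : List (List (String × Int))) (gap_threshold : Int) : Prop :=
  (∀ d ∈ items, (d.map Prod.fst).Nodup) ∧
  (∀ p ∈ items.zip items.tail, (List.lookup "end" p.1).isSome = true ∧ (List.lookup "start" p.2).isSome = true)
instance (items : List (List (String × Int))) (gap_threshold : Int) : Decidable (Pre_group_sentences items gap_threshold) := by unfold Pre_group_sentences; infer_instance

def pvWitness_group_sentences : (List (List (String × Int))) × Int :=
  ([[("start", 0), ("end", 100)], [("start", 700), ("end", 900)]], 400)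

def Spec_group_sentences (items : List (List (String × Int))) (gap_threshold : Int) (out : List (List (List (String × Int)))) : Prop := out = group_sentences_alt items gap_threshold
instance (items : List (List (String × Int))) (gap_threshold : Int) (out : List (List (List (String × Int)))) : Decidable (Spec_group_sentences items gap_threshold out) := by unfold Spec_group_sentences; infer_instance

-- ===== CLAIM (what is proved, stated in full; the proofs are below) =====
def Claim_equal_group_sentences : Prop := ∀ (items : List (List (String × Int))) (gap_threshold : Int), Dom_group_sentences items gap_threshold → Pre_group_sentences items gap_threshold → Spec_group_sentences items gap_threshold (group_sentences items gap_threshold)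

-- ===== LEMMAS AND PROOFS =====

-- canonical greedy-span description of the grouping, used as a bridge between the two ports
def pvGrow (gap : Int) (x : List (String × Int)) :
    List (List (String × Int)) → List (List (String × Int)) × List (List (String × Int))
  | [] => ([], [])
  | y :: ys =>
    if pvGap y x > gap then ([], y :: ys)
    else
      let p := pvGrow gap y ys
      (y :: p.1, p.2)

theorem pvGrow_len {gap : Int} :
    ∀ (xs : List (List (String × Int))) (x : List (String × Int)),
      (pvGrow gap x xs).2.length ≤ xs.length := by
  intro xs
  induction xs with
  | nil => intro x; simp [pvGrow]
  | cons y ys ih =>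
    intro x
    simp only [pvGrow]
    split
    · simp
    · exact Nat.le_succ_of_le (ih y)

def pvChunk (gap : Int) : List (List (String × Int)) → List (List (List (String × Int)))
  | [] => []
  | x :: xs => (x :: (pvGrow gap x xs).1) :: pvChunk gap (pvGrow gap x xs).2
termination_by l => l.length
decreasing_by
  simp only [List.length_cons]
  exact Nat.lt_succ_of_le (pvGrow_len xs x)

theorem pvGrow_append {gap : Int} :
    ∀ (xs : List (List (String × Int))) (x : List (String × Int)),
      (pvGrow gap x xs).1 ++ (pvGrow gap x xs).2 = xs := by
  intro xs
  induction xs with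
  | nil => intro x; simp [pvGrow]
  | cons y ys ih =>
    intro x
    simp only [pvGrow]
    split
    · simp
    · simpa using ih y

-- A-side: the index loop as a structural pass over the tail with the previous element carried
def pvLoop (gap : Int) (prev : List (String × Int)) :
    List (List (String × Int)) → List (List (List (String × Int))) × List (List (String × Int)) →
    List (List (List (String × Int))) × List (List (String × Int))
  | [], st => st
  | y :: ys, st =>
    if pvGap y prev > gap then pvLoop gap y ys (st.1 ++ [st.2], [y])
    else pvLoop gap y ys (st.1, st.2 ++ [y])

theorem pvFoldA (items : List (List (String × Int))) (gap : Int) :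
    ∀ (ys : List (List (String × Int))) (a : Nat) (prev : List (String × Int)),
      items.drop a = prev :: ys →
      ∀ st, (PySem.List.pyRange a ((items.length : Int) - 1) 1).foldl (pvStepA items gap) st =
        pvLoop gap prev ys st := by
  intro ys
  induction ys with
  | nil =>
    intro a prev h st
    have ha : a < items.length := by
      by_contra hh
      push_neg at hh
      rw [List.drop_eq_nil_of_le hh] at h
      simp at h
    have hl := congrArg List.length h
    simp only [List.length_drop, List.length_cons, List.length_nil] at hl
    rw [PySem.List.pyRange_one_eq_nil (by push_cast; omega)]
    simp [pvLoop]
  | cons y ys ih =>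
    intro a prev h st
    have ha : a < items.length := by
      by_contra hh
      push_neg at hh
      rw [List.drop_eq_nil_of_le hh] at h
      simp at h
    have hl := congrArg List.length h
    simp only [List.length_drop, List.length_cons] at hl
    have h0 : items[a]? = some prev := by
      have h' := congrArg (fun l => l[0]?) h
      simpa [List.getElem?_drop] using h'
    have h1 : items[a + 1]? = some y := by
      have h' := congrArg (fun l => l[1]?) h
      simpa [List.getElem?_drop] using h' 
    have hprev : PySem.List.pyGetD items (a : Int) [] = prev := by
      rw [PySem.List.pyGetD_natCast, List.getD_eq_getElem?_getD, h0]; rfl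
    have hc : ((a : Int) + 1) = ((a + 1 : Nat) : Int) := by push_cast; ring
    have hnext : PySem.List.pyGetD items ((a : Int) + 1) [] = y := by
      rw [hc, PySem.List.pyGetD_natCast, List.getD_eq_getElem?_getD, h1]; rfl
    have hdrop : items.drop (a + 1) = y :: ys := by
      rw [← List.tail_drop, h]; rfl
    rw [PySem.List.pyRange_one_cons (by push_cast; omega), List.foldl_cons, hc,
      ih (a + 1) y hdrop]
    have hstep : pvStepA items gap st (a : Nat) =
        if pvGap y prev > gap then (st.1 ++ [st.2], [y]) else (st.1, st.2 ++ [y]) := by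
      simp only [pvStepA, hprev]
      rw [hnext]
    rw [hstep]
    simp only [pvLoop]
    split <;> rfl

def pvFin (st : List (List (List (String × Int))) × List (List (String × Int))) :
    List (List (List (String × Int))) :=
  if st.2.isEmpty then st.1 else st.1 ++ [st.2]

theorem pvLoop_chunk (gap : Int) :
    ∀ (xs : List (List (String × Int))) (prev : List (String × Int)) segs cur, cur ≠ [] →
      pvFin (pvLoop gap prev xs (segs, cur)) =
      segs ++ (cur ++ (pvGrow gap prev xs).1) :: pvChunk gap (pvGrow gap prev xs).2 := by
  intro xs
  induction xs with
  | nil => intro prev segs cur hc; simp [pvLoop, pvGrow, pvChunk, pvFin, hc]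
  | cons y ys ih =>
    intro prev segs cur hc
    simp only [pvLoop, pvGrow]
    split
    · rw [ih y (segs ++ [cur]) [y] (by simp)]
      simp [pvChunk]
    · rw [ih y segs (cur ++ [y]) (by simp)]
      simp

theorem pvA_eq_chunk (items : List (List (String × Int))) (gap : Int) :
    group_sentences items gap = pvChunk gap items := by
  cases items with
  | nil => simp [group_sentences, pvChunk]
  | cons x xs =>
    simp only [group_sentences]
    rw [show (0 : Int) = ((0 : Nat) : Int) by norm_num,
      pvFoldA (x :: xs) gap xs 0 x rfl ([], [x])]
    show pvFin (pvLoop gap x xs ([], [x])) = _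
    rw [pvLoop_chunk gap xs x [] [x] (by simp)]
    simp [pvChunk]

theorem pvGrow_chain (gap : Int) :
    ∀ (tail : List (List (String × Int))) (x : List (String × Int)),
      List.IsChain (fun u v => ¬ pvGap v u > gap) (x :: (pvGrow gap x tail).1) := by
  intro tail
  induction tail with
  | nil => intro x; exact .singleton _
  | cons y ys ih =>
    intro x
    simp only [pvGrow]
    split
    · exact .singleton _
    · exact .cons_cons (by assumption) (ih y)

theorem pvGrow_cut (gap : Int) :
    ∀ (tail : List (List (String × Int))) (x y : List (String × Int))
      (r' : List (List (String × Int))),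
      (pvGrow gap x tail).2 = y :: r' →
      pvGap y ((x :: (pvGrow gap x tail).1).getLast (List.cons_ne_nil _ _)) > gap := by
  intro tail
  induction tail with
  | nil => intro x y r' h; simp [pvGrow] at h
  | cons z zs ih =>
    intro x y r' h
    by_cases hc : pvGap z x > gap
    · simp only [pvGrow, if_pos hc] at h ⊢
      obtain ⟨rfl, rfl⟩ : z = y ∧ zs = r' := by
        constructor <;> [exact (List.cons.inj h).1; exact (List.cons.inj h).2]
      simpa using hc
    · simp only [pvGrow, if_neg hc] at h ⊢
      rw [List.getLast_cons (List.cons_ne_nil _ _)]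
      exact ih z y r' h

theorem pvGetMidD (pre mid r : List (List (String × Int))) (k : Nat)
    (h1 : pre.length ≤ k) (h2 : k < pre.length + mid.length) (d : List (String × Int)) :
    (pre ++ (mid ++ r)).getD k d = mid.getD (k - pre.length) d := by
  rw [List.getD_eq_getElem?_getD, List.getD_eq_getElem?_getD,
    List.getElem?_append_right (l₁ := pre) (l₂ := mid ++ r) h1,
    List.getElem?_append_left (l₂ := r) (by omega)]

def pvCuts (gap : Int) (items : List (List (String × Int))) (lo : Int) : List Int :=
  (PySem.List.pyRange lo (items.length : Int) 1).filter
    (fun i => decide (pvGap (PySem.List.pyGetD items i []) (PySem.List.pyGetD items (i - 1) []) > gap))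

theorem pvB_main (gap : Int) (items : List (List (String × Int))) :
    ∀ (k : Nat) (pre tail : List (List (String × Int))) (x : List (String × Int)),
      tail.length = k → items = pre ++ x :: tail →
      (((pre.length : Int) :: (pvCuts gap items ((pre.length : Int) + 1) ++ [(items.length : Int)])).zip
          (pvCuts gap items ((pre.length : Int) + 1) ++ [(items.length : Int)])).map
        (fun p => PySem.List.slice items (some p.1) (some p.2)) = pvChunk gap (x :: tail) := by
  intro k
  induction k using Nat.strong_induction_on with
  | _ k ih =>
    intro pre tail x hlen hitems
    have hsr : (pvGrow gap x tail).1 ++ (pvGrow gap x tail).2 = tail := pvGrow_append tail x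
    set s := (pvGrow gap x tail).1 with hs
    set r := (pvGrow gap x tail).2 with hrr
    have hmid : items = pre ++ ((x :: s) ++ r) := by
      rw [hitems, ← hsr]; simp
    have hn : items.length = pre.length + (s.length + 1) + r.length := by
      rw [hmid]; simp [List.length_append]; omega
    have hnI : (items.length : Int) =
        (pre.length : Int) + ((s.length : Int) + 1) + (r.length : Int) := by
      rw [hn]; push_cast; ring
    have hchain := (pvGrow_chain gap tail x)
    rw [← hs, List.isChain_iff_getElem] at hchain
    -- no segment boundary strictly inside the first greedy segment
    have hN1 : ∀ i : Int, (pre.length : Int) + 1 ≤ i →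
        i < (pre.length : Int) + ((s.length : Int) + 1) →
        ¬ (pvGap (PySem.List.pyGetD items i []) (PySem.List.pyGetD items (i - 1) []) > gap) := by
      intro i hi1 hi2
      have hj : ∃ j : Nat, (j : Int) = i ∧ pre.length + 1 ≤ j ∧ j < pre.length + (s.length + 1) := by
        refine ⟨i.toNat, ?_, ?_, ?_⟩ <;> omega
      obtain ⟨j, hji, hj1, hj2⟩ := hj
      have hi1' : (j : Int) - 1 = ((j - 1 : Nat) : Int) := by omega
      rw [← hji, hi1', PySem.List.pyGetD_natCast, PySem.List.pyGetD_natCast, hmid,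
        pvGetMidD pre (x :: s) r j (by omega) (by simp; omega) [],
        pvGetMidD pre (x :: s) r (j - 1) (by omega) (by simp; omega) []]
      have hu := hchain (j - 1 - pre.length) (by simp; omega)
      have e1 : (x :: s).getD (j - pre.length) [] =
          (x :: s)[j - 1 - pre.length + 1]'(by simp; omega) := by
        rw [List.getD_eq_getElem?_getD, List.getElem?_eq_getElem (by simp; omega)]
        simp only [Option.getD_some]
        congr 1 <;> omega
      have e2 : (x :: s).getD (j - 1 - pre.length) [] =
          (x :: s)[j - 1 - pre.length]'(by simp; omega) := by
        rw [List.getD_eq_getElem?_getD, List.getElem?_eq_getElem (by simp; omega)]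
        rfl
      rw [e1, e2]
      exact hu
    have hchunk : pvChunk gap (x :: tail) =
        (x :: (pvGrow gap x tail).1) :: pvChunk gap (pvGrow gap x tail).2 := by
      rw [pvChunk]
    cases hr : r with
    | nil =>
      have hcuts : pvCuts gap items ((pre.length : Int) + 1) = [] := by
        unfold pvCuts
        rw [List.filter_eq_nil_iff]
        intro i hi
        rw [PySem.List.mem_pyRange_one] at hi
        simp only [decide_eq_true_eq]
        have hr0 : r.length = 0 := by rw [hr]; rfl
        exact hN1 i hi.1 (by omega)
      rw [hcuts]
      simp only [List.nil_append, List.zip_cons_cons, List.zip_nil_right, List.map_cons,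
        List.map_nil]
      have hslice : PySem.List.slice items (some (pre.length : Int)) (some (items.length : Int))
          = x :: tail := by
        rw [PySem.List.slice_natCast, hitems, List.drop_left]
        refine List.take_of_length_le ?_
        simp only [List.length_append, List.length_cons]
        omega
      rw [hslice, hchunk, ← hs, ← hrr, hr]
      have : pvChunk gap ([] : List (List (String × Int))) = [] := by rw [pvChunk]
      rw [this]
      have hst : s = tail := by rw [← hsr, hr]; simp
      rw [hst]
    | cons y r' =>
      have hrlen : r.length = r'.length + 1 := by rw [hr]; rfl
      have hk : s.length + r.length = k := by
        have := congrArg List.length hsr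
        simp at this
        omega
      set cN : Nat := pre.length + (s.length + 1) with hcN
      have hcI : (cN : Int) = (pre.length : Int) + ((s.length : Int) + 1) := by
        rw [hcN]; push_cast; ring
      -- the gap condition holds at the boundary index cN
      have hlast := pvGrow_cut gap tail x y r' (by rw [← hrr, hr])
      rw [List.getLast_eq_getElem] at hlast
      have hy : items.getD cN [] = y := by
        rw [hmid, List.getD_eq_getElem?_getD,
          List.getElem?_append_right (l₁ := pre) (by omega),
          List.getElem?_append_right (l₁ := x :: s) (by simp; omega)]
        rw [hr]
        have : cN - pre.length - (x :: s).length = 0 := by simp; omega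
        rw [this]
        rfl
      have hx : items.getD (cN - 1) [] = (x :: s)[s.length]'(by simp) := by
        rw [hmid, pvGetMidD pre (x :: s) r (cN - 1) (by omega) (by simp; omega) [],
          List.getD_eq_getElem?_getD, List.getElem?_eq_getElem (by simp; omega)]
        simp only [Option.getD_some]
        congr 1 <;> omega
      have hcut : pvGap (PySem.List.pyGetD items (cN : Int) [])
          (PySem.List.pyGetD items ((cN : Int) - 1) []) > gap := by
        rw [show ((cN : Int) - 1) = ((cN - 1 : Nat) : Int) by omega,
          PySem.List.pyGetD_natCast, PySem.List.pyGetD_natCast, hy, hx]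
        have hidx : (x :: s)[s.length]'(by simp) = (x :: s)[(x :: s).length - 1]'(by simp) := by
          congr 1 <;> simp
        rw [hidx]
        exact hlast
      -- split the cut list at the boundary
      have hsplit : pvCuts gap items ((pre.length : Int) + 1) =
          (cN : Int) :: pvCuts gap items ((cN : Int) + 1) := by
        unfold pvCuts
        rw [PySem.List.pyRange_one_append ((pre.length : Int) + 1) (cN : Int)
          (items.length : Int) (by omega) (by omega), List.filter_append]
        have h1 : ((PySem.List.pyRange ((pre.length : Int) + 1) (cN : Int) 1).filter
            (fun i => decide (pvGap (PySem.List.pyGetD items i [])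
              (PySem.List.pyGetD items (i - 1) []) > gap))) = [] := by
          rw [List.filter_eq_nil_iff]
          intro i hi
          rw [PySem.List.mem_pyRange_one] at hi
          simp only [decide_eq_true_eq]
          exact hN1 i hi.1 (by omega)
        rw [h1, List.nil_append, PySem.List.pyRange_one_cons (by omega),
          List.filter_cons_of_pos (by simpa using hcut)]
      rw [hsplit]
      simp only [List.cons_append, List.zip_cons_cons, List.map_cons]
      have hIH := ih r'.length (by omega) (pre ++ (x :: s)) r' y rfl
        (by rw [hmid, hr]; simp [List.append_assoc])
      have hplen : ((pre ++ (x :: s)).length : Int) = (cN : Int) := by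
        simp only [List.length_append, List.length_cons]
        rw [hcN]
      rw [hplen] at hIH
      rw [hIH]
      have hslice : PySem.List.slice items (some (pre.length : Int)) (some (cN : Int))
          = x :: s := by
        rw [show ((cN : Int)) = (((pre.length + (s.length + 1) : Nat)) : Int) by rfl,
          PySem.List.slice_natCast, hmid, List.drop_left]
        have : pre.length + (s.length + 1) - pre.length = (x :: s).length := by
          simp only [List.length_cons]
          omega
        rw [this, List.take_left]
      rw [hslice, hchunk, ← hs, ← hrr, hr]

theorem pvB_eq_chunk (items : List (List (String × Int))) (gap : Int) :
    group_sentences_alt items gap = pvChunk gap items := by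
  cases items with
  | nil => simp [group_sentences_alt, pvChunk]
  | cons x xs =>
    unfold group_sentences_alt
    rw [if_neg (by simp)]
    have h := pvB_main gap (x :: xs) xs.length [] xs x rfl rfl
    simp only [List.length_nil, Nat.cast_zero] at h
    rw [show (0 : Int) + 1 = 1 by ring] at h
    simpa [pvCuts] using h

-- ===== VERDICT (by name: the statement is the Claim_ definition above) =====
theorem group_sentences_spec : Claim_equal_group_sentences := by
  intro items gap _ _
  unfold Spec_group_sentences
  rw [pvA_eq_chunk, pvB_eq_chunk]
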